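-- pv_equiv track=rewrite | github.com/BollaTarun/Tarun_Week1_Assessment | StudentGrading4.py | grade_calculation
-- ===== SOURCE A (Python) =====
-- def grade_allocator(marks):
--     if marks>=85:
--         return 'O'
--     elif marks>=70 :
--         return 'A'
--     elif marks>=65 :
--         return 'B'
--     elif marks>=50 :
--         return 'C'
--     elif marks>=35:
--         return "Pass"
--     else:
--         return "Fail"
--
-- def grade_calculation(marks_list):
--     sum=0
--     Fail=False
--     subject_grade=[]
--     for i in range(5):
--         sum+=marks_list[i]
--         subject_grade.append(grade_allocator(marks_list[i]))
--         if subject_grade[i]=="Fail":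
--             Fail=True
--     Avg=int(sum/5)
--     overall_grade=grade_allocator(Avg)
--     return subject_grade,sum,overall_grade,Fail
-- ===== SOURCE B (Python) =====
-- _LABELS = ('Fail', 'Pass', 'C', 'B', 'A', 'O')
-- _CUTS = (35, 50, 65, 70, 85)
--
-- def _grade(m):
--     # a mark's grade index is the number of cutoffs it clears
--     return _LABELS[sum(m >= c for c in _CUTS)]
--
-- def grade_calculation(marks_list):
--     first5 = [marks_list[i] for i in range(5)]
--     total = sum(first5)
--     return [_grade(m) for m in first5], total, _grade(total // 5), min(first5) < 35
-- ===== Notes on version B (the rewrite author's own statement) =====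
-- stated objective: simpler
-- what changed: Grades come from indexing a label tuple by the count of cutoffs a mark clears (rank computation) instead of an if/elif ladder; the single indexed accumulator loop with running sum, append and mutable Fail flag is replaced by staged passes over the five marks (comprehension, sum(), a grade map) with the fail flag as the numeric test min(first5) < 35 instead of scanning grade strings; the average uses floor division total // 5, proved to yield the same grade as A's int(total/5) for every total; Pre_ excludes lists shorter than 5, on which A raises IndexError.
import Mathlib
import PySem

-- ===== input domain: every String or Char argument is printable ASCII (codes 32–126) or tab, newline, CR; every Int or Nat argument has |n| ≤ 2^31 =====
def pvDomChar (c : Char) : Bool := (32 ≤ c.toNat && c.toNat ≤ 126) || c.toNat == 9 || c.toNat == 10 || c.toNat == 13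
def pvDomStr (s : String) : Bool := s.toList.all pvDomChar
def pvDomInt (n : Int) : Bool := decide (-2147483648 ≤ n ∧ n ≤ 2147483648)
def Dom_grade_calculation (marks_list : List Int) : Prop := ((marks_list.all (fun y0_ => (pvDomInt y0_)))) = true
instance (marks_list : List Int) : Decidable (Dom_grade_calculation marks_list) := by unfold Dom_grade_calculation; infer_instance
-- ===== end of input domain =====

-- B grades by rank (label indexed by the count of cutoffs cleared) over the first five
-- marks, with the fail flag as a numeric minimum test (objective: simpler).

-- ===== PORT A =====
def grade_allocator (marks : Int) : String :=
  if marks ≥ 85 then "O"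
  else if marks ≥ 70 then "A"
  else if marks ≥ 65 then "B"
  else if marks ≥ 50 then "C"
  else if marks ≥ 35 then "Pass"
  else "Fail"

def grade_calculation (marks_list : List Int) : List String × Int × String × Bool :=
  -- state (sum, Fail, subject_grade); marks_list[i] via pyGet? (none = IndexError, excluded by Pre_)
  let st := (PySem.List.pyRange 0 5 1).foldl
    (fun (st : Int × Bool × List String) i =>
      let m := (PySem.List.pyGet? marks_list i).getD 0
      let sum := st.1 + m
      let sg := st.2.2 ++ [grade_allocator m]
      let fail := if (PySem.List.pyGet? sg i).getD "" == "Fail" then true else st.2.1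
      (sum, fail, sg))
    (0, false, ([] : List String))
  -- int(sum/5): truncating division, exact on Dom where |sum| ≤ 5·2^31 < 2^53
  let avg := PySem.Int.truncdiv st.1 5
  (st.2.2, st.1, grade_allocator avg, st.2.1)

-- ===== PORT B =====
-- _LABELS and _CUTS
def gradeLabels : List String := ["Fail", "Pass", "C", "B", "A", "O"]
def gradeCuts : List Int := [35, 50, 65, 70, 85]

-- _LABELS[sum(m >= c for c in _CUTS)]  (the 0/1-sum is List.countP; index always in range)
def gradeOf (m : Int) : String :=
  (PySem.List.pyGet? gradeLabels ((gradeCuts.countP (fun c => m ≥ c) : Nat) : Int)).getD ""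

def grade_calculation_alt (marks_list : List Int) : List String × Int × String × Bool :=
  let first5 := (PySem.List.pyRange 0 5 1).map
    (fun i => (PySem.List.pyGet? marks_list i).getD 0)           -- [marks_list[i] for i in range(5)]
  let total := first5.sum
  (first5.map gradeOf, total, gradeOf (PySem.Int.floordiv total 5),
   decide (((PySem.List.min? first5 (fun x => x)).getD 0) < 35))   -- min() of a nonempty list under Pre_

-- ===== PRECONDITION & SPEC =====
-- Pre_ excludes lists of fewer than 5 marks, on which A raises IndexError.
def Pre_grade_calculation (marks_list : List Int) : Prop := 5 ≤ marks_list.length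
instance (marks_list : List Int) : Decidable (Pre_grade_calculation marks_list) := by unfold Pre_grade_calculation; infer_instance
def pvWitness_grade_calculation : List Int := [90, 40, 20, 70, 55]

def Spec_grade_calculation (marks_list : List Int) (out : List String × Int × String × Bool) : Prop := out = grade_calculation_alt marks_list
instance (marks_list : List Int) (out : List String × Int × String × Bool) : Decidable (Spec_grade_calculation marks_list out) := by unfold Spec_grade_calculation; infer_instance

-- ===== CLAIM (what is proved, stated in full; the proofs are below) =====
def Claim_equal_grade_calculation : Prop := ∀ (marks_list : List Int), Dom_grade_calculation marks_list → Pre_grade_calculation marks_list → Spec_grade_calculation marks_list (grade_calculation marks_list)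

-- ===== LEMMAS AND PROOFS =====

-- B's rank lookup computes exactly A's if/elif chain
theorem gradeOf_eq (m : Int) : gradeOf m = grade_allocator m := by
  unfold gradeOf grade_allocator gradeLabels gradeCuts
  simp only [List.countP, List.countP.go, Bool.cond_eq_ite, decide_eq_true_eq, ge_iff_le]
  split_ifs <;> first | rfl | omega

-- any mark below every cutoff grades "Fail", on both sides
theorem allocator_fail (m : Int) : (grade_allocator m = "Fail") ↔ m < 35 := by
  unfold grade_allocator
  split_ifs <;> simp_all <;> omega

-- A's int(total/5) and B's total // 5 always land in the same grade
theorem avg_grade_eq (t : Int) :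
    grade_allocator (PySem.Int.truncdiv t 5) = grade_allocator (PySem.Int.floordiv t 5) := by
  have hf : PySem.Int.floordiv t 5 = t / 5 := PySem.Int.floordiv_eq_ediv_of_pos (by omega)
  have ht : PySem.Int.truncdiv t 5 = Int.tdiv t 5 := rfl
  have hsign : (5 : Int).sign = 1 := rfl
  by_cases h : 0 ≤ t
  · have : PySem.Int.truncdiv t 5 = PySem.Int.floordiv t 5 := by
      rw [ht, hf, Int.tdiv_eq_ediv]
      simp [h]
    rw [this]
  · -- t < 0: both averages are below 35, so both grade "Fail"
    have ha : PySem.Int.truncdiv t 5 < 35 := by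
      rw [ht, Int.tdiv_eq_ediv, hsign]; split_ifs <;> omega
    have hb : PySem.Int.floordiv t 5 < 35 := by rw [hf]; omega
    rw [(allocator_fail _).mpr ha, (allocator_fail _).mpr hb]

theorem grade_calculation_eq (a b c d e : Int) (rest : List Int) :
    grade_calculation (a :: b :: c :: d :: e :: rest) = grade_calculation_alt (a :: b :: c :: d :: e :: rest) := by
  have hr : PySem.List.pyRange 0 5 1 = [0, 1, 2, 3, 4] := by decide
  unfold grade_calculation grade_calculation_alt
  rw [hr]
  simp only [List.foldl, List.map, List.sum_cons, List.sum_nil,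
    PySem.List.pyGet?, PySem.List.pyIdx?, PySem.List.min?_id_cons]
  norm_num [gradeOf_eq, avg_grade_eq, (show Int.toNat 2 = 2 from rfl), (show Int.toNat 3 = 3 from rfl), (show Int.toNat 4 = 4 from rfl), List.getElem_cons_succ, List.getElem_cons_zero,
    (show ((0:Int) ≤ (rest.length:Int)) by omega),
    (show ((0:Int) ≤ (rest.length:Int) + 1) by omega),
    (show ((1:Int) ≤ (rest.length:Int) + 1) by omega),
    (show ((0:Int) ≤ (rest.length:Int) + 1 + 1) by omega),
    (show ((1:Int) ≤ (rest.length:Int) + 1 + 1) by omega),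
    (show ((2:Int) ≤ (rest.length:Int) + 1 + 1) by omega),
    (show ((0:Int) ≤ (rest.length:Int) + 1 + 1 + 1) by omega),
    (show ((1:Int) ≤ (rest.length:Int) + 1 + 1 + 1) by omega),
    (show ((2:Int) ≤ (rest.length:Int) + 1 + 1 + 1) by omega),
    (show ((3:Int) ≤ (rest.length:Int) + 1 + 1 + 1) by omega),
    (show ((0:Int) ≤ (rest.length:Int) + 1 + 1 + 1 + 1) by omega),
    (show ((1:Int) ≤ (rest.length:Int) + 1 + 1 + 1 + 1) by omega),
    (show ((2:Int) ≤ (rest.length:Int) + 1 + 1 + 1 + 1) by omega),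
    (show ((3:Int) ≤ (rest.length:Int) + 1 + 1 + 1 + 1) by omega),
    (show ((4:Int) ≤ (rest.length:Int) + 1 + 1 + 1 + 1) by omega)]
  have hsum : a + b + c + d + e = a + (b + (c + (d + e))) := by ring
  rw [hsum]
  -- Fail flag: A's sequential or-chain over the five grades vs B's min < 35 (already an or-chain)
  refine ⟨rfl, rfl, ?_⟩
  simp only [allocator_fail]
  by_cases h1 : a < 35 <;> by_cases h2 : b < 35 <;> by_cases h3 : c < 35 <;>
    by_cases h4 : d < 35 <;> by_cases h5 : e < 35 <;> simp [h1, h2, h3, h4, h5]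

-- ===== VERDICT (by name: the statement is the Claim_ definition above) =====
theorem grade_calculation_spec : Claim_equal_grade_calculation := by
  intro marks_list _ hpre
  unfold Spec_grade_calculation
  unfold Pre_grade_calculation at hpre
  match marks_list, hpre with
  | a :: b :: c :: d :: e :: rest, _ => exact grade_calculation_eq a b c d e rest
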